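-- pv_equiv track=rewrite | github.com/hse-econ-data-science/dap_2022-23 | sem07_wow/sem07_2113/cheat.py | repl
-- ===== SOURCE A (Python) =====
-- def repl(s1):
--     s2 = []
--     for line in s1:
--         if line.startswith('#'):
--             continue
--         if line.find('//') != -1:
--             line = line[:line.find('//')]
--         s2.append(line)
--     syms = set('+-*/%^:;"\'<>!=[](){}&|.,?')
--     prev = ''
--     ans = []
--     s = ''.join(s2).replace('\n', '')
--     s = s.replace(' ', '')
--     s = s.replace('\t', '')
--     for c in s:
--         if c not in syms and prev != '#':
--             ans.append('#')
--             prev = '#'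
--         elif c in syms:
--             ans.append(c)
--             prev = c
--     return ''.join(ans)
-- ===== SOURCE B (Python) =====
-- def _strip_comment(line):
--     i = line.find('//')
--     return line[:i] if i != -1 else line
--
--
-- def repl(s1):
--     parts = [_strip_comment(line) for line in s1 if not line.startswith('#')]
--     syms = set('+-*/%^:;"\'<>!=[](){}&|.,?')
--     s = ''.join(parts).replace('\n', '').replace(' ', '').replace('\t', '')
--     out = []
--     i, n = 0, len(s)
--     while i < n:
--         if s[i] in syms:
--             j = i + 1
--             while j < n and s[j] in syms:
--                 j += 1
--             out.append(s[i:j])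
--         else:
--             j = i + 1
--             while j < n and s[j] not in syms:
--                 j += 1
--             out.append('#')
--         i = j
--     return ''.join(out)
-- ===== Notes on version B (the rewrite author's own statement) =====
-- stated objective: idiomatic
-- what changed: Phase 1 becomes a filter+map comprehension and the prev-tracking character state machine is replaced by an explicit run-grouping scan that copies whole symbol runs and collapses each non-symbol run to a single '#'.
import Mathlib
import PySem

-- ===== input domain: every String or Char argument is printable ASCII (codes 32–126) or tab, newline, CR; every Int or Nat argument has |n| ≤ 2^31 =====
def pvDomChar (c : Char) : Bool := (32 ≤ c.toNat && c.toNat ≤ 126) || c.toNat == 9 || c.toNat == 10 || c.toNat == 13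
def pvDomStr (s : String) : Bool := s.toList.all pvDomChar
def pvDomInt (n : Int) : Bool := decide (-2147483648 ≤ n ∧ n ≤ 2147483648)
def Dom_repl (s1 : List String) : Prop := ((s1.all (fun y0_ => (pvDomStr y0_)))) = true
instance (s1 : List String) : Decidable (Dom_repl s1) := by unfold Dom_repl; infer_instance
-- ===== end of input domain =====

-- B replaces A's prev-tracking character state machine by an explicit run-grouping scan
-- (whole symbol runs copied, each non-symbol run collapsed to one '#'); objective: idiomatic.

-- ===== PORT A =====
-- the symbol set, shared literal of both programs
def pvSyms : PySem.Set Char := PySem.Set.ofList "+-*/%^:;\"'<>!=[](){}&|.,?".toList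

-- one iteration of A's line loop ('continue' on '#', truncate at '//', append)
def replLineStep (acc : List String) (line : String) : List String :=
  if PySem.Str.startswith line "#" then acc
  else
    let line := if PySem.Str.find line "//" ≠ -1 then
                  PySem.Str.slice line none (some (PySem.Str.find line "//"))
                else line
    acc ++ [line]

-- one iteration of A's char loop; state = (prev, ans)
def replCharStep (st : String × List Char) (c : Char) : String × List Char :=
  if c ∉ pvSyms ∧ st.1 ≠ "#" then ("#", st.2 ++ ['#'])
  else if c ∈ pvSyms then (String.ofList [c], st.2 ++ [c])
  else st

def repl (s1 : List String) : String :=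
  let s2 := s1.foldl replLineStep []
  let s := PySem.Str.replace (PySem.Str.replace (PySem.Str.replace
             (PySem.Str.join "" s2) "\n" "") " " "") "\t" ""
  let st := s.toList.foldl replCharStep ("", [])
  String.ofList st.2

-- ===== PORT B =====
def stripComment (line : String) : String :=
  let i := PySem.Str.find line "//"
  if i ≠ -1 then PySem.Str.slice line none (some i) else line

-- run-grouping scan: copy a whole symbol run, collapse a non-symbol run to '#'
def replAltScan : List Char → List Char
  | [] => []
  | c :: cs =>
    if c ∈ pvSyms then
      (c :: cs.takeWhile (fun d => decide (d ∈ pvSyms))) ++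
        replAltScan (cs.dropWhile (fun d => decide (d ∈ pvSyms)))
    else
      '#' :: replAltScan (cs.dropWhile (fun d => decide (d ∉ pvSyms)))
  termination_by cs => cs.length
  decreasing_by
    · simpa using Nat.lt_succ_of_le (List.length_dropWhile_le _ _)
    · simpa using Nat.lt_succ_of_le (List.length_dropWhile_le _ _)

def repl_alt (s1 : List String) : String :=
  let parts := (s1.filter (fun l => !PySem.Str.startswith l "#")).map stripComment
  let s := PySem.Str.replace (PySem.Str.replace (PySem.Str.replace
             (PySem.Str.join "" parts) "\n" "") " " "") "\t" ""
  String.ofList (replAltScan s.toList)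

-- ===== PRECONDITION & SPEC =====
def Spec_repl (s1 : List String) (out : String) : Prop := out = repl_alt s1
instance (s1 : List String) (out : String) : Decidable (Spec_repl s1 out) := by unfold Spec_repl; infer_instance

-- ===== CLAIM (what is proved, stated in full; the proofs are below) =====
def Claim_equal_repl : Prop := ∀ (s1 : List String), Dom_repl s1 → Spec_repl s1 (repl s1)

-- ===== LEMMAS AND PROOFS =====

-- A's line loop equals B's filter-and-map comprehension
lemma phase1_eq (l : List String) (acc : List String) :
    l.foldl replLineStep acc =
      acc ++ (l.filter (fun x => !PySem.Str.startswith x "#")).map stripComment := by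
  induction l generalizing acc with
  | nil => simp
  | cons x xs ih =>
    simp only [List.foldl_cons, List.filter_cons]
    by_cases h : PySem.Chars.startswith x.toList ['#'] = true
    · simp [replLineStep, h, ih]
    · simp only [Bool.not_eq_true] at h
      simp [replLineStep, h, ih, stripComment, List.append_assoc]

-- a scan may be split at an arbitrary symbol-run boundary
lemma scan_run (cs : List Char) :
    replAltScan cs =
      cs.takeWhile (fun d => decide (d ∈ pvSyms)) ++
        replAltScan (cs.dropWhile (fun d => decide (d ∈ pvSyms))) := by
  cases cs with
  | nil => simp [replAltScan]
  | cons c cs =>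
    by_cases h : c ∈ pvSyms
    · rw [replAltScan, if_pos h]
      simp [h]
    · rw [replAltScan, if_neg h]
      have ht : List.takeWhile (fun d => decide (d ∈ pvSyms)) (c :: cs) = [] := by
        simp [h]
      have hd : List.dropWhile (fun d => decide (d ∈ pvSyms)) (c :: cs) = c :: cs := by
        simp [h]
      rw [ht, hd, List.nil_append, replAltScan, if_neg h]

lemma mk_singleton_ne_hash {c : Char} (h : c ∈ pvSyms) : String.ofList [c] ≠ "#" := by
  intro hmk
  have h3 := congrArg String.toList hmk
  simp at h3
  subst h3
  revert h
  decide

-- state-machine invariant: A's char foldl computes B's run-grouping scan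
lemma loop_eq (cs : List Char) (prev : String) (acc : List Char) :
    (cs.foldl replCharStep (prev, acc)).2 =
      if prev = "#" then acc ++ replAltScan (cs.dropWhile (fun c => decide (c ∉ pvSyms)))
      else acc ++ replAltScan cs := by
  induction cs generalizing prev acc with
  | nil => split <;> simp [replAltScan]
  | cons c cs ih =>
    simp only [List.foldl_cons]
    by_cases hc : c ∈ pvSyms
    · have hstep : replCharStep (prev, acc) c = (String.ofList [c], acc ++ [c]) := by
        simp [replCharStep, hc]
      rw [hstep, ih]
      have hne : String.ofList [c] ≠ "#" := mk_singleton_ne_hash hc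
      rw [if_neg hne]
      have hscan : replAltScan (c :: cs) = c :: replAltScan cs := by
        rw [replAltScan]
        simp only [if_pos hc]
        conv_rhs => rw [scan_run cs]
        simp
      split
      · simp [hc, hscan]
      · simp [hscan]
    · by_cases hp : prev = "#"
      · have hstep : replCharStep (prev, acc) c = (prev, acc) := by
          simp [replCharStep, hc, hp]
        rw [hstep, ih, if_pos hp, if_pos hp]
        simp [hc]
      · have hstep : replCharStep (prev, acc) c = ("#", acc ++ ['#']) := by
          simp [replCharStep, hc, hp]
        rw [hstep, ih, if_pos rfl, if_neg hp]
        have hscan : replAltScan (c :: cs) =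
            '#' :: replAltScan (cs.dropWhile (fun d => decide (d ∉ pvSyms))) := by
          rw [replAltScan]; simp [hc]
        simp [hscan]

-- ===== VERDICT (by name: the statement is the Claim_ definition above) =====
theorem repl_spec : Claim_equal_repl := by
  intro s1 _
  unfold Spec_repl repl repl_alt
  rw [phase1_eq, List.nil_append]
  simp only [loop_eq]
  simp
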